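-- pv_equiv track=rewrite | github.com/Theano/libgpuarray | pygpu/array.py | f_contiguous_strides
-- ===== SOURCE A (Python) =====
-- def f_contiguous_strides(itemsize, shape):
--     if shape:
--         strides = [itemsize]
--         for s in shape[:-1]:
--             strides.append(strides[-1]*s)
--         return tuple(strides)
--     else:
--         return ()
-- ===== SOURCE B (Python) =====
-- def _prod(xs):
--     p = 1
--     for x in xs:
--         p *= x
--     return p
--
--
-- def f_contiguous_strides(itemsize, shape):
--     return tuple(itemsize * _prod(shape[:i]) for i in range(len(shape)))
-- ===== Notes on version B (the rewrite author's own statement) =====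
-- stated objective: alternative
-- what changed: Each stride is computed independently as itemsize times the prefix product of the shape entries before it (index-driven comprehension), instead of A's running-accumulator loop that appends strides[-1]*s; the empty shape falls out of range(0) with no branch.
import Mathlib
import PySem

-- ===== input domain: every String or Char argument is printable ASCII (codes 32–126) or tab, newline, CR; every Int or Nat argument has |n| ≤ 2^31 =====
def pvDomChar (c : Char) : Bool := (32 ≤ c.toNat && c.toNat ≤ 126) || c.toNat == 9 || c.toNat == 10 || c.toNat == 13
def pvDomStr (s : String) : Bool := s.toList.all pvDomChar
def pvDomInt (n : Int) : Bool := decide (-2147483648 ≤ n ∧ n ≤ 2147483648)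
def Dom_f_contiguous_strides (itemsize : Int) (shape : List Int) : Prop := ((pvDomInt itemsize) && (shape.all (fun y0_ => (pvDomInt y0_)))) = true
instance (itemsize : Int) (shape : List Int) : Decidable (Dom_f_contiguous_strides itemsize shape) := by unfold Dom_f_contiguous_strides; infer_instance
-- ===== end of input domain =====

-- B computes each stride independently as itemsize * product(shape[:i]) over an index comprehension,
-- replacing A's running-accumulator append loop; same values, same O(n)-vs-O(n^2) trade stated in the claim.

-- ===== PORT A =====
-- strides = [itemsize]; for s in shape[:-1]: strides.append(strides[-1]*s)
def f_contiguous_strides (itemsize : Int) (shape : List Int) : List Int :=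
  if shape ≠ [] then
    (PySem.List.slice shape none (some (-1))).foldl
      (fun strides s => strides ++ [PySem.List.pyGetD strides (-1) 0 * s]) [itemsize]
  else []

-- ===== PORT B =====
-- p = 1; for x in xs: p *= x
def pvProd (xs : List Int) : Int := xs.foldl (fun p x => p * x) 1

-- tuple(itemsize * _prod(shape[:i]) for i in range(len(shape)))
def f_contiguous_strides_alt (itemsize : Int) (shape : List Int) : List Int :=
  (PySem.List.pyRange 0 (PySem.List.len shape) 1).map
    (fun i => itemsize * pvProd (PySem.List.slice shape none (some i)))

-- ===== PRECONDITION & SPEC =====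
def Spec_f_contiguous_strides (itemsize : Int) (shape : List Int) (out : List Int) : Prop := out = f_contiguous_strides_alt itemsize shape
instance (itemsize : Int) (shape : List Int) (out : List Int) : Decidable (Spec_f_contiguous_strides itemsize shape out) := by unfold Spec_f_contiguous_strides; infer_instance

-- ===== CLAIM (what is proved, stated in full; the proofs are below) =====
def Claim_equal_f_contiguous_strides : Prop := ∀ (itemsize : Int) (shape : List Int), Dom_f_contiguous_strides itemsize shape → Spec_f_contiguous_strides itemsize shape (f_contiguous_strides itemsize shape)

-- ===== LEMMAS AND PROOFS =====

-- the tail A's loop appends after the running value x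
def pvTail (x : Int) : List Int → List Int
  | [] => []
  | s :: t => (x * s) :: pvTail (x * s) t

theorem pvFold_eq (l : List Int) : ∀ (acc : List Int) (x : Int), acc ≠ [] → acc.getLast? = some x →
    l.foldl (fun strides s => strides ++ [PySem.List.pyGetD strides (-1) 0 * s]) acc
      = acc ++ pvTail x l := by
  induction l with
  | nil => intro acc x _ _; simp [pvTail]
  | cons s t ih =>
    intro acc x hne hlast
    have hget : PySem.List.pyGetD acc (-1) 0 = x := by
      rw [PySem.List.pyGetD_neg_one acc 0 hne]
      simpa [List.getLast?_eq_some_getLast hne] using hlast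
    simp only [List.foldl_cons, hget, pvTail]
    rw [ih (acc ++ [x * s]) (x * s) (by simp) (by simp)]
    simp

theorem pvProd_eq (l : List Int) : pvProd l = l.prod := by
  simp [pvProd, List.prod_eq_foldl]

theorem pvTail_eq_map (l : List Int) : ∀ (x : Int),
    x :: pvTail x l = (List.range (l.length + 1)).map (fun i => x * (l.take i).prod) := by
  induction l with
  | nil => intro x; simp [pvTail]
  | cons s t ih =>
    intro x
    rw [List.range_succ_eq_map]
    simp only [pvTail, List.map_cons, List.take_zero, List.prod_nil, mul_one,
      List.map_map, List.length_cons]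
    congr 1
    rw [ih (x * s)]
    apply List.map_congr_left
    intro i _
    simp [mul_assoc]

-- ===== VERDICT =====
theorem f_contiguous_strides_spec : Claim_equal_f_contiguous_strides := by
  intro itemsize shape _
  unfold Spec_f_contiguous_strides f_contiguous_strides f_contiguous_strides_alt
  cases shape with
  | nil => simp [PySem.List.len, PySem.List.pyRange]
  | cons s0 t0 =>
    set shape := s0 :: t0 with hsh
    have hne : shape ≠ [] := by simp [hsh]
    rw [if_pos hne, PySem.List.slice_to_neg_one,
      pvFold_eq shape.dropLast [itemsize] itemsize (by simp) (by simp)]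
    have hlen : shape.dropLast.length + 1 = shape.length := by
      simp [hsh]
    have hA : [itemsize] ++ pvTail itemsize shape.dropLast
        = (List.range shape.length).map (fun i => itemsize * (shape.dropLast.take i).prod) := by
      rw [← hlen, ← pvTail_eq_map]; rfl
    rw [hA]
    -- B side: pyRange 0 n 1 = range n, slice none (some i) = take, pvProd = prod
    have hB : (PySem.List.pyRange 0 (PySem.List.len shape) 1).map
        (fun i => itemsize * pvProd (PySem.List.slice shape none (some i)))
        = (List.range shape.length).map (fun i => itemsize * (shape.take i).prod) := by
      rw [show PySem.List.len shape = (shape.length : Int) from PySem.List.len_eq shape,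
        PySem.List.pyRange_zero_natCast]
      rw [List.map_map]
      apply List.map_congr_left
      intro i _
      simp [PySem.List.slice_to_natCast, pvProd_eq]
    rw [hB]
    apply List.map_congr_left
    intro i hi
    have hi' : i < shape.length := List.mem_range.mp hi
    congr 1
    rw [List.dropLast_eq_take]
    rw [List.take_take, Nat.min_eq_left (by omega)]
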